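-- pv_equiv track=rewrite | github.com/WHorn712/AppMarket | main.py | validar_data_nascimento
-- ===== SOURCE A (Python) =====
-- def validar_data_nascimento(data):
--     new_data = ''
--     for c in data:
--         if c.isnumeric():
--             new_data += c
--     data = new_data
--     if len(data) != 8:
--         return [False, "FORMATO DA DATA INCORRETO"]
--     ano = data[4:8]
--     ano = int(ano)
--     mes = int(data[2:4])
--     dia = int(data[0:2])
--     if len(data) != 8:
--         return [False, "FORMATO DA DATA INCORRETO"]
--     elif ano < 1910 or ano > 2020:
--         return [False, "IDADE INCORRETA"]
--     elif mes < 1 or mes >12 or dia < 1 or dia > 31: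
--         return [False, "FORMATO DA DATA INCORRETO"]
--     else:
--         ultimo_dia = 30
--         if mes in (1, 3, 5, 7, 8, 10, 12) and dia <= 31:
--             return [True, ""]
--         elif mes == 2:
--             # verifica se é ano bissexto
--             if (ano % 4 == 0) and (ano % 100 != 0 or ano % 400 == 0):
--                 if dia <= 29:
--                     return [True, ""]
--             else:
--                 if dia <= 29:
--                     return [True, ""]
--         else:
--             if dia <= 30:
--                 return [True, ""]
--         return [False, "DATA INEXISTENTE"]
-- ===== SOURCE B (Python) =====
-- IMPOSSIBLE_DATES = {(2, 30), (2, 31), (4, 31), (6, 31), (9, 31), (11, 31)}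
--
-- def validar_data_nascimento(data):
--     digits = [c for c in data if c.isnumeric()]
--     if len(digits) != 8:
--         return [False, "FORMATO DA DATA INCORRETO"]
--     s = ''.join(digits)
--     dia, mes, ano = int(s[0:2]), int(s[2:4]), int(s[4:8])
--     if not 1910 <= ano <= 2020:
--         return [False, "IDADE INCORRETA"]
--     if not (1 <= mes <= 12 and 1 <= dia <= 31):
--         return [False, "FORMATO DA DATA INCORRETO"]
--     if (mes, dia) in IMPOSSIBLE_DATES:
--         return [False, "DATA INEXISTENTE"]
--     return [True, ""]
-- ===== Notes on version B (the rewrite author's own statement) =====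
-- stated objective: simpler
-- what changed: Instead of branching per month and computing leap years to derive a day limit, B never computes a month length at all: after the same length/year/range guards it rejects exactly the six impossible (month, day) pairs {(2,30),(2,31),(4,31),(6,31),(9,31),(11,31)} by set membership (February 29 is accepted like A's dead leap-year branches do) and accepts everything else.
import Mathlib
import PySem

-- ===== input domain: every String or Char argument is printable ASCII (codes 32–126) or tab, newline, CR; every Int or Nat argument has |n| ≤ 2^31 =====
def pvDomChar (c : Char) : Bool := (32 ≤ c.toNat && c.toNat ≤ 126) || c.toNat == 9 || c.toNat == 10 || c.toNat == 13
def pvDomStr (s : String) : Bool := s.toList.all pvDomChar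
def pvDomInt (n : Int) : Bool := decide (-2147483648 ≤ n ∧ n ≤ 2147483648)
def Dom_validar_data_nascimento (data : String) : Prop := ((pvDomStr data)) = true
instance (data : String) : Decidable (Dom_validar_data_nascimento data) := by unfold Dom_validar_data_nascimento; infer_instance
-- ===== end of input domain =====

-- B drops A's per-month branch ladder and leap-year computation entirely: it rejects exactly the six impossible (month, day) pairs by set membership; simpler, same behaviour.


-- ===== PORT A =====
-- c.isnumeric() on printable-ASCII input is exactly PySem.Chars.isdigit (only '0'..'9' qualify).
-- int(<digit chars>) on the guarded path always succeeds, so '.getD 0' of PySem.Int.ofChars? is never taken there.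
def validar_data_nascimento (data : String) : Bool × String :=
  let nd := data.toList.foldl (fun acc c => if PySem.Chars.isdigit c then acc ++ [c] else acc) []
  if nd.length ≠ 8 then (false, "FORMATO DA DATA INCORRETO")
  else
    let ano := (PySem.Int.ofChars? (PySem.List.slice nd (some 4) (some 8))).getD 0
    let mes := (PySem.Int.ofChars? (PySem.List.slice nd (some 2) (some 4))).getD 0
    let dia := (PySem.Int.ofChars? (PySem.List.slice nd (some 0) (some 2))).getD 0
    if nd.length ≠ 8 then (false, "FORMATO DA DATA INCORRETO")
    else if ano < 1910 ∨ ano > 2020 then (false, "IDADE INCORRETA")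
    else if mes < 1 ∨ mes > 12 ∨ dia < 1 ∨ dia > 31 then (false, "FORMATO DA DATA INCORRETO")
    else
      if (mes = 1 ∨ mes = 3 ∨ mes = 5 ∨ mes = 7 ∨ mes = 8 ∨ mes = 10 ∨ mes = 12) ∧ dia ≤ 31 then
        (true, "")
      else if mes = 2 then
        if PySem.Int.mod ano 4 = 0 ∧ (PySem.Int.mod ano 100 ≠ 0 ∨ PySem.Int.mod ano 400 = 0) then
          if dia ≤ 29 then (true, "") else (false, "DATA INEXISTENTE")
        else
          if dia ≤ 29 then (true, "") else (false, "DATA INEXISTENTE")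
      else
        if dia ≤ 30 then (true, "") else (false, "DATA INEXISTENTE")

-- ===== PORT B =====
-- the module-level Python set literal IMPOSSIBLE_DATES; only its membership is ever consulted
def pvImpossibleDates : PySem.Set (Int × Int) :=
  PySem.Set.ofList [(2, 30), (2, 31), (4, 31), (6, 31), (9, 31), (11, 31)]

def validar_data_nascimento_alt (data : String) : Bool × String :=
  let digits := data.toList.filter (fun c => PySem.Chars.isdigit c)
  if digits.length ≠ 8 then (false, "FORMATO DA DATA INCORRETO")
  else
    let dia := (PySem.Int.ofChars? (PySem.List.slice digits (some 0) (some 2))).getD 0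
    let mes := (PySem.Int.ofChars? (PySem.List.slice digits (some 2) (some 4))).getD 0
    let ano := (PySem.Int.ofChars? (PySem.List.slice digits (some 4) (some 8))).getD 0
    if ¬ (1910 ≤ ano ∧ ano ≤ 2020) then (false, "IDADE INCORRETA")
    else if ¬ (1 ≤ mes ∧ mes ≤ 12 ∧ 1 ≤ dia ∧ dia ≤ 31) then (false, "FORMATO DA DATA INCORRETO")
    else if PySem.Set.contains pvImpossibleDates (mes, dia) then (false, "DATA INEXISTENTE")
    else (true, "")

-- ===== PRECONDITION & SPEC =====
def Spec_validar_data_nascimento (data : String) (out : Bool × String) : Prop := out = validar_data_nascimento_alt data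
instance (data : String) (out : Bool × String) : Decidable (Spec_validar_data_nascimento data out) := by unfold Spec_validar_data_nascimento; infer_instance

-- ===== CLAIM (what is proved, stated in full; the proofs are below) =====
def Claim_equal_validar_data_nascimento : Prop := ∀ (data : String), Dom_validar_data_nascimento data → Spec_validar_data_nascimento data (validar_data_nascimento data)

-- ===== LEMMAS AND PROOFS =====

-- A's month branch ladder equals B's impossible-dates membership test, within the shared range guard
lemma pvLadder_eq_blacklist (ano mes dia : Int) (hm1 : 1 ≤ mes) (hm2 : mes ≤ 12)
    (hd1 : 1 ≤ dia) (hd2 : dia ≤ 31) :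
    (if (mes = 1 ∨ mes = 3 ∨ mes = 5 ∨ mes = 7 ∨ mes = 8 ∨ mes = 10 ∨ mes = 12) ∧ dia ≤ 31 then
        ((true, "") : Bool × String)
      else if mes = 2 then
        if PySem.Int.mod ano 4 = 0 ∧ (PySem.Int.mod ano 100 ≠ 0 ∨ PySem.Int.mod ano 400 = 0) then
          if dia ≤ 29 then (true, "") else (false, "DATA INEXISTENTE")
        else
          if dia ≤ 29 then (true, "") else (false, "DATA INEXISTENTE")
      else
        if dia ≤ 30 then (true, "") else (false, "DATA INEXISTENTE")) =
    (if PySem.Set.contains pvImpossibleDates (mes, dia) then ((false, "DATA INEXISTENTE") : Bool × String)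
      else (true, "")) := by
  interval_cases mes <;>
    simp [pvImpossibleDates, PySem.Set.contains, PySem.Set.ofList, Prod.ext_iff] <;>
    (try split_ifs) <;> first | rfl | omega | exact ⟨rfl, rfl⟩

-- ===== VERDICT (by name: the statement is the Claim_ definition above) =====
theorem validar_data_nascimento_spec : Claim_equal_validar_data_nascimento := by
  intro data _
  unfold Spec_validar_data_nascimento
  simp only [validar_data_nascimento, validar_data_nascimento_alt]
  rw [PySem.List.foldl_append_if]
  simp only [List.nil_append, List.map_id']
  generalize (List.filter (fun c => PySem.Chars.isdigit c) data.toList) = nd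
  by_cases h8 : nd.length ≠ 8
  · simp only [if_pos h8]
  · simp only [if_neg h8]
    generalize (PySem.Int.ofChars? (PySem.List.slice nd (some 4) (some 8))).getD 0 = ano
    generalize (PySem.Int.ofChars? (PySem.List.slice nd (some 2) (some 4))).getD 0 = mes
    generalize (PySem.Int.ofChars? (PySem.List.slice nd (some 0) (some 2))).getD 0 = dia
    by_cases ha : ano < 1910 ∨ ano > 2020
    · rw [if_pos ha, if_pos (by omega : ¬ (1910 ≤ ano ∧ ano ≤ 2020))]
    · rw [if_neg ha, if_neg (by omega : ¬ ¬ (1910 ≤ ano ∧ ano ≤ 2020))]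
      by_cases hr : mes < 1 ∨ mes > 12 ∨ dia < 1 ∨ dia > 31
      · rw [if_pos hr, if_pos (by omega : ¬ (1 ≤ mes ∧ mes ≤ 12 ∧ 1 ≤ dia ∧ dia ≤ 31))]
      · rw [if_neg hr, if_neg (by omega : ¬ ¬ (1 ≤ mes ∧ mes ≤ 12 ∧ 1 ≤ dia ∧ dia ≤ 31))]
        exact pvLadder_eq_blacklist ano mes dia (by omega) (by omega) (by omega) (by omega)
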